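-- pv_equiv track=rewrite | github.com/chaulemuoichin/quant-mean-reversion-engine-v3.3 | mean_reversion_standalone.py | _regime_transition_matrix
-- ===== SOURCE A (Python) =====
-- from typing import Any, Dict, List, Optional, Tuple
--
-- def _regime_transition_matrix(actions_log: List[Dict]) -> Dict:
--     """Count transitions between regimes."""
--     trans: Dict[str, Dict[str, int]] = {}
--     prev = None
--     for a in actions_log:
--         cur = a.get("regime", "UNKNOWN")
--         if prev is not None and prev != cur:
--             trans.setdefault(prev, {})
--             trans[prev][cur] = trans[prev].get(cur, 0) + 1
--         prev = cur
--     return trans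
-- ===== SOURCE B (Python) =====
-- def _regime_transition_matrix(actions_log):
--     """Count transitions between regimes: project to the regime sequence,
--     form the distinct consecutive pairs, then group-by-previous and count."""
--     regimes = [a.get("regime", "UNKNOWN") for a in actions_log]
--     pairs = [(p, c) for p, c in zip(regimes, regimes[1:]) if p != c]
--     trans = {}
--     for p in dict.fromkeys(p for p, _ in pairs):
--         counts = {}
--         for c in (c for q, c in pairs if q == p):
--             counts[c] = counts.get(c, 0) + 1
--         trans[p] = counts
--     return trans
-- ===== Notes on version B (the rewrite author's own statement) =====
-- stated objective: alternative
-- what changed: A counts transitions in one stateful pass that threads prev and mutates a nested dict in place; B first projects the log to the regime sequence, builds the list of distinct consecutive pairs via zip, then constructs each row by grouping the pairs by previous regime and counting successors.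
import Mathlib
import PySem

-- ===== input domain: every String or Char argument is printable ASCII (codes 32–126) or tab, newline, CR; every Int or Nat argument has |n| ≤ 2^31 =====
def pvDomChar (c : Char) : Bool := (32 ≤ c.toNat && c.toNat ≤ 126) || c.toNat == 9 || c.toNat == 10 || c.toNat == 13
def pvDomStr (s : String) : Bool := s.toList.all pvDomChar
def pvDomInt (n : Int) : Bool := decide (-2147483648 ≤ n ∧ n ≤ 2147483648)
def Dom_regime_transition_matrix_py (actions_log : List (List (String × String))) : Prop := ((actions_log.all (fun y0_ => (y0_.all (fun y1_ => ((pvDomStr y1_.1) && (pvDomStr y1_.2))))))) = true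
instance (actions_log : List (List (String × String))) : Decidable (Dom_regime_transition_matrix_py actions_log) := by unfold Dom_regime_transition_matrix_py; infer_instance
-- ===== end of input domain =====

-- B recomputes the same transition matrix by a different decomposition: project the log to the
-- regime sequence, form the distinct consecutive pairs, then group-by-previous-regime and count
-- (objective: alternative structure, same asymptotic cost).

-- shared helper: a.get("regime", "UNKNOWN") on the assoc-list dict (first-match lookup)
def pvCur (a : List (String × String)) : String :=
  (PySem.Dict.mk a).getD "regime" "UNKNOWN"

-- ===== PORT A =====
-- A's loop body: after trans.setdefault(prev, {}) the key prev is present, so the Python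
-- trans[prev] (KeyError lookup) is exactly getD prev empty here.
def pvStepA (st : PySem.Dict String (PySem.Dict String Int) × Option String) (cur : String) :
    PySem.Dict String (PySem.Dict String Int) × Option String :=
  match st.2 with
  | some prev =>
    if prev ≠ cur then
      let t := st.1.setdefault prev PySem.Dict.empty
      (t.insert prev ((t.getD prev PySem.Dict.empty).insert cur
          ((t.getD prev PySem.Dict.empty).getD cur 0 + 1)), some cur)
    else (st.1, some cur)
  | none => (st.1, some cur)

def regime_transition_matrix_py (actions_log : List (List (String × String))) :
    List (String × List (String × Int)) :=
  ((actions_log.foldl (fun st a => pvStepA st (pvCur a)) (PySem.Dict.empty, none)).1.items).map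
    (fun kv => (kv.1, kv.2.items))

-- ===== PORT B =====
-- the pairs comprehension: [(p, c) for p, c in zip(regimes, regimes[1:]) if p != c]
-- (regimes[1:] on a list is .tail)
def pvPairs (regimes : List String) : List (String × String) :=
  (regimes.zip regimes.tail).filter (fun pc => pc.1 != pc.2)

-- the inner counting loop: counts[c] = counts.get(c, 0) + 1
def pvCounts (cs : List String) : PySem.Dict String Int :=
  cs.foldl (fun d c => d.insert c (d.getD c 0 + 1)) PySem.Dict.empty

-- for p in dict.fromkeys(...): count the successors of p, then trans[p] = counts
def pvTrans (pairs : List (String × String)) : PySem.Dict String (PySem.Dict String Int) :=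
  (PySem.List.dedup (pairs.map Prod.fst)).foldl
    (fun t p => t.insert p (pvCounts ((pairs.filter (fun q => q.1 == p)).map Prod.snd)))
    PySem.Dict.empty

def regime_transition_matrix_py_alt (actions_log : List (List (String × String))) :
    List (String × List (String × Int)) :=
  (pvTrans (pvPairs (actions_log.map pvCur))).items.map (fun kv => (kv.1, kv.2.items))

-- ===== PRECONDITION & SPEC =====
def Spec_regime_transition_matrix_py (actions_log : List (List (String × String))) (out : List (String × List (String × Int))) : Prop := out = regime_transition_matrix_py_alt actions_log
instance (actions_log : List (List (String × String))) (out : List (String × List (String × Int))) : Decidable (Spec_regime_transition_matrix_py actions_log out) := by unfold Spec_regime_transition_matrix_py; infer_instance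

-- ===== CLAIM (what is proved, stated in full; the proofs are below) =====
def Claim_equal_regime_transition_matrix_py : Prop := ∀ (actions_log : List (List (String × String))), Dom_regime_transition_matrix_py actions_log → Spec_regime_transition_matrix_py actions_log (regime_transition_matrix_py actions_log)

-- ===== LEMMAS AND PROOFS =====

-- the transition increment, with the redundant setdefault collapsed away
def pvIncr (t : PySem.Dict String (PySem.Dict String Int)) (pc : String × String) :
    PySem.Dict String (PySem.Dict String Int) :=
  t.insert pc.1 ((t.getD pc.1 PySem.Dict.empty).insert pc.2
    ((t.getD pc.1 PySem.Dict.empty).getD pc.2 0 + 1))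

lemma pvStepA_eq_incr (t : PySem.Dict String (PySem.Dict String Int)) (p c : String) :
    pvStepA (t, some p) c = ((if p ≠ c then pvIncr t (p, c) else t), some c) := by
  unfold pvStepA pvIncr
  by_cases h : p = c
  · simp [h]
  · simp only [h, ne_eq, not_false_iff, if_true]
    rcases Bool.eq_false_or_eq_true (t.contains p) with hc | hc
    · rw [PySem.Dict.setdefault_of_contains t _ hc]
    · rw [PySem.Dict.setdefault_of_not_contains t _ hc]
      rw [PySem.Dict.getD_insert_self, PySem.Dict.insert_insert_self,
        PySem.Dict.getD_of_not_contains t _ hc]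

lemma pvPairs_cons_cons (p c : String) (rest : List String) :
    pvPairs (p :: c :: rest) =
      (if p ≠ c then [(p, c)] else []) ++ pvPairs (c :: rest) := by
  unfold pvPairs
  by_cases h : p = c <;> simp [List.zip, h]

lemma foldA_pairs (rs : List String) :
    ∀ (p : String) (t : PySem.Dict String (PySem.Dict String Int)),
      (rs.foldl pvStepA (t, some p)).1 = (pvPairs (p :: rs)).foldl pvIncr t := by
  induction rs with
  | nil => intro p t; simp [pvPairs]
  | cons c rest ih =>
    intro p t
    rw [List.foldl_cons, pvStepA_eq_incr, pvPairs_cons_cons, List.foldl_append, ih]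
    by_cases h : p = c <;> simp [h]

lemma foldA_start (rs : List String) :
    (rs.foldl pvStepA (PySem.Dict.empty, none)).1 = (pvPairs rs).foldl pvIncr PySem.Dict.empty := by
  cases rs with
  | nil => rfl
  | cons r rest =>
    rw [List.foldl_cons]
    exact foldA_pairs rest r PySem.Dict.empty

-- the heart: the incrementally-built nested dict equals the group-by-then-count table
lemma pv_items_fold {v : Type} (l : List String) (g : String → PySem.Dict String v)
    (hl : l.Nodup) :
    (l.foldl (fun t p => t.insert p (g p)) PySem.Dict.empty).items =
      l.map (fun p => (p, g p)) := by
  have h := PySem.Dict.items_foldl_insert_fresh l (fun p => p) g PySem.Dict.empty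
    (by intro a _; exact PySem.Dict.contains_empty _) (by simpa using hl)
  simpa using h

-- the heart: the incrementally-built nested dict equals the group-by-then-count table
lemma items_foldl_incr (L : List (String × String)) :
    (L.foldl pvIncr PySem.Dict.empty).items =
      (PySem.List.dedup (L.map Prod.fst)).map
        (fun p => (p, PySem.Dict.counter ((L.filter (fun q => q.1 == p)).map Prod.snd))) := by
  induction L using List.reverseRecOn with
  | nil => rfl
  | append_singleton L x ih =>
    obtain ⟨p, c⟩ := x
    rw [List.foldl_append, List.foldl_cons, List.foldl_nil]
    set d := L.foldl pvIncr PySem.Dict.empty with hd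
    set K := PySem.List.dedup (L.map Prod.fst) with hK
    set f := fun p => PySem.Dict.counter ((L.filter (fun q => q.1 == p)).map Prod.snd) with hf
    have hKnodup : K.Nodup := by
      rw [hK, PySem.List.dedup_eq_ofList]; exact PySem.Set.nodup_ofList _
    have hkeys : d.keys = K := by
      show d.items.map Prod.fst = K
      rw [ih, List.map_map]; simp [Function.comp_def]
    have hmemK : ∀ q, q ∈ K ↔ q ∈ L.map Prod.fst := by
      intro q; rw [hK, PySem.List.dedup_eq_ofList]; exact PySem.Set.mem_ofList _ _
    have hcont : ∀ q, d.contains q = decide (q ∈ K) := by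
      intro q; rw [PySem.Dict.contains_eq_decide_mem_keys, hkeys]
    have hgetD_mem : ∀ q ∈ K, d.getD q PySem.Dict.empty = f q := by
      intro q hq
      exact PySem.Dict.getD_of_mem_items d (ih ▸ List.mem_map_of_mem hq)
        (hkeys ▸ hKnodup) _
    -- the new column for key q, over L ++ [(p, c)]
    have hfilter : ∀ q : String, ((L ++ [(p, c)]).filter (fun r => r.1 == q)) =
        L.filter (fun r => r.1 == q) ++ (if p = q then [(p, c)] else []) := by
      intro q
      rw [List.filter_append]
      by_cases h : p = q <;> simp [h]
    by_cases hp : p ∈ K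
    · -- existing previous-regime row: value overwritten in place
      have hc : d.contains p = true := by rw [hcont]; simpa using hp
      show (d.insert p _).items = _
      rw [PySem.Dict.items_insert_of_contains _ _ hc, ih, List.map_map]
      have hded : PySem.List.dedup ((L ++ [(p, c)]).map Prod.fst) = K := by
        rw [List.map_append, show List.map Prod.fst [(p, c)] = [p] from rfl,
          PySem.List.dedup_eq_ofList, PySem.Set.ofList_append_singleton,
          ← PySem.List.dedup_eq_ofList, ← hK]
        exact PySem.Set.add_of_mem hp
      rw [hded]
      apply List.map_congr_left
      intro q hq
      simp only [Function.comp_def]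
      by_cases hqp : q = p
      · subst hqp
        rw [if_pos (by simp), hfilter q, if_pos rfl, List.map_append,
          show List.map Prod.snd [(q, c)] = [c] from rfl,
          PySem.Dict.counter_append_singleton, hgetD_mem q hq]
        rfl
      · rw [if_neg (by simp [hqp]), hfilter q, if_neg (fun h => hqp h.symm),
          List.append_nil]
    · -- fresh previous-regime row: appended at the end
      have hc : d.contains p = false := by rw [hcont]; simpa using hp
      show (d.insert p _).items = _
      rw [PySem.Dict.items_insert_of_not_contains _ _ hc, ih]
      have hded : PySem.List.dedup ((L ++ [(p, c)]).map Prod.fst) = K ++ [p] := by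
        rw [List.map_append, show List.map Prod.fst [(p, c)] = [p] from rfl,
          PySem.List.dedup_eq_ofList, PySem.Set.ofList_append_singleton,
          ← PySem.List.dedup_eq_ofList, ← hK]
        exact PySem.Set.add_of_not_mem hp
      rw [hded, List.map_append]
      congr 1
      · apply List.map_congr_left
        intro q hq
        have hqp : p ≠ q := fun h => hp (h ▸ hq)
        rw [hfilter q, if_neg hqp, List.append_nil]
      · have hLp : L.filter (fun r => r.1 == p) = [] := by
          rw [List.filter_eq_nil_iff]
          intro r hr
          have hrm : r.1 ∈ L.map Prod.fst := List.mem_map_of_mem hr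
          simp only [beq_iff_eq]
          intro h
          exact hp ((hmemK p).mpr (h ▸ hrm))
        simp only [List.map_cons, List.map_nil]
        rw [hfilter p, if_pos rfl, hLp, List.nil_append,
          PySem.Dict.getD_of_not_contains d _ hc]
        rfl

-- ===== VERDICT (by name: the statement is the Claim_ definition above) =====
theorem regime_transition_matrix_py_spec : Claim_equal_regime_transition_matrix_py := by
  intro actions_log _hdom
  unfold Spec_regime_transition_matrix_py regime_transition_matrix_py regime_transition_matrix_py_alt
      pvTrans pvCounts
  rw [show (actions_log.foldl (fun st a => pvStepA st (pvCur a)) (PySem.Dict.empty, none)) =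
      ((actions_log.map pvCur).foldl pvStepA (PySem.Dict.empty, none)) from List.foldl_map.symm,
    foldA_start, items_foldl_incr,
    pv_items_fold _ _ (by
      rw [PySem.List.dedup_eq_ofList]; exact PySem.Set.nodup_ofList _)]
  simp only [PySem.Dict.foldl_insert_getD_add_one_eq_counter]
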